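-- pv_equiv track=rewrite | github.com/cognominal/pentomanim | manim/pentomino_6x10.py | transform
-- ===== SOURCE A (Python) =====
-- from typing import Dict, Iterable, List, Sequence, Set, Tuple
--
-- Coord = Tuple[int, int]
--
-- def normalize(cells: Iterable[Coord]) -> Tuple[Coord, ...]:
--     c_list = list(cells)
--     min_r = min(r for r, _ in c_list)
--     min_c = min(c for _, c in c_list)
--     return tuple(sorted((r - min_r, c - min_c) for r, c in c_list))
--
-- def transform(cells: Iterable[Coord], k: int, reflect: bool) -> Tuple[Coord, ...]:
--     out: List[Coord] = []
--     for r, c in cells: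
--         x, y = r, c
--         if reflect:
--             y = -y
--         for _ in range(k % 4):
--             x, y = y, -x
--         out.append((x, y))
--     return normalize(out)
-- ===== SOURCE B (Python) =====
-- from typing import Dict, Iterable, List, Sequence, Set, Tuple
--
-- Coord = Tuple[int, int]
--
-- def transform(cells: Iterable[Coord], k: int, reflect: bool) -> Tuple[Coord, ...]:
--     # Bounding-box method: compute the extremes of the original cells once, then
--     # place each cell directly at its final normalized position (no negative
--     # intermediates, no separate normalize pass), and sort.
--     cl = list(cells)
--     kk = k % 4
--     r0 = min(r for r, _ in cl)
--     r1 = max(r for r, _ in cl)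
--     c0 = min(c for _, c in cl)
--     c1 = max(c for _, c in cl)
--     h = r1 - r0
--     w = c1 - c0
--     out: List[Coord] = []
--     for r, c in cl:
--         u = r - r0
--         v = (c1 - c) if reflect else (c - c0)
--         if kk == 0:
--             out.append((u, v))
--         elif kk == 1:
--             out.append((v, h - u))
--         elif kk == 2:
--             out.append((h - u, w - v))
--         else:
--             out.append((w - v, u))
--     return tuple(sorted(out))
-- ===== Notes on version B (the rewrite author's own statement) =====
-- stated objective: alternative
-- what changed: B drops A's transform-then-normalize pipeline: it computes the bounding box (min/max of rows and columns) of the ORIGINAL cells once and places each cell directly at its final normalized coordinate via max-based flips (no negated intermediates, no post-hoc min subtraction pass), then sorts.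
import Mathlib
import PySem

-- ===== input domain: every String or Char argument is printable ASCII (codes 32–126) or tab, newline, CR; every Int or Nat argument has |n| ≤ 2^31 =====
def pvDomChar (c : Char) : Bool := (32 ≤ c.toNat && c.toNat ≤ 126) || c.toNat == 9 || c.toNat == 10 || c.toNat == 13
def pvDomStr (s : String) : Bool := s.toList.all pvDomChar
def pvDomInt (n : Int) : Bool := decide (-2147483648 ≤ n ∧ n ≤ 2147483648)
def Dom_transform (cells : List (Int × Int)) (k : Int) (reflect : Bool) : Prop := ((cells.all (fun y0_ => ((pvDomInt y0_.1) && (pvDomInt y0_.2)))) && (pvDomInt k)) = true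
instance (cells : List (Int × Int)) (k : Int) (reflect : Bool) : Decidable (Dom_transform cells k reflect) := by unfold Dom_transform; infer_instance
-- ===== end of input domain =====

-- B replaces A's transform-then-normalize pipeline by a single bounding-box pass: it takes
-- min/max of the ORIGINAL rows/columns once and emits each cell's final normalized
-- coordinate directly (objective: alternative).

-- ===== PORT A =====
-- A's helper normalize; the `none` branch is Python's ValueError on min() of an empty
-- sequence, excluded by Pre_transform
def pyNormalize (cs : List (Int × Int)) : List (Int × Int) :=
  match PySem.List.min? (cs.map Prod.fst) (fun x => x), PySem.List.min? (cs.map Prod.snd) (fun x => x) with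
  | some mr, some mc =>
      PySem.List.sorted2 (cs.map (fun p => (p.1 - mr, p.2 - mc))) Prod.fst Prod.snd false
  | _, _ => []

def transform (cells : List (Int × Int)) (k : Int) (reflect : Bool) : List (Int × Int) :=
  pyNormalize
    (cells.foldl (fun out rc =>
      let x : Int := rc.1
      let y : Int := if reflect then -rc.2 else rc.2
      let xy := (PySem.List.pyRange 0 (PySem.Int.mod k 4) 1).foldl
                  (fun (p : Int × Int) _ => (p.2, -p.1)) (x, y)
      out ++ [xy]) [])

-- ===== PORT B =====
-- Source B's bounding-box algorithm; the `none` branch is Python's ValueError on min()/max()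
-- of an empty sequence, excluded by Pre_transform
def transform_alt (cells : List (Int × Int)) (k : Int) (reflect : Bool) : List (Int × Int) :=
  let kk := PySem.Int.mod k 4
  match PySem.List.min? (cells.map Prod.fst) (fun x => x),
        PySem.List.max? (cells.map Prod.fst) (fun x => x),
        PySem.List.min? (cells.map Prod.snd) (fun x => x),
        PySem.List.max? (cells.map Prod.snd) (fun x => x) with
  | some r0, some r1, some c0, some c1 =>
      let h := r1 - r0
      let w := c1 - c0
      PySem.List.sorted2
        (cells.foldl (fun out rc =>
          let u := rc.1 - r0
          let v := if reflect then c1 - rc.2 else rc.2 - c0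
          out ++ [if kk = 0 then (u, v)
                  else if kk = 1 then (v, h - u)
                  else if kk = 2 then (h - u, w - v)
                  else (w - v, u)]) [])
        Prod.fst Prod.snd false
  | _, _, _, _ => []

-- ===== PRECONDITION & SPEC =====
-- Pre_ excludes only the empty cell list, on which A (and B) raise ValueError via min().
def Pre_transform (cells : List (Int × Int)) (k : Int) (reflect : Bool) : Prop := cells ≠ []
instance (cells : List (Int × Int)) (k : Int) (reflect : Bool) : Decidable (Pre_transform cells k reflect) := by unfold Pre_transform; infer_instance
def pvWitness_transform : (List (Int × Int)) × Int × Bool := ([(0, 0), (1, 2)], 3, true)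

def Spec_transform (cells : List (Int × Int)) (k : Int) (reflect : Bool) (out : List (Int × Int)) : Prop := out = transform_alt cells k reflect
instance (cells : List (Int × Int)) (k : Int) (reflect : Bool) (out : List (Int × Int)) : Decidable (Spec_transform cells k reflect out) := by unfold Spec_transform; infer_instance

-- ===== CLAIM (what is proved, stated in full; the proofs are below) =====
def Claim_equal_transform : Prop := ∀ (cells : List (Int × Int)) (k : Int) (reflect : Bool), Dom_transform cells k reflect → Pre_transform cells k reflect → Spec_transform cells k reflect (transform cells k reflect)

-- ===== LEMMAS AND PROOFS =====

-- the repeated rotation (x,y) ↦ (y,-x), applied (k % 4) times, in closed form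
theorem rot_closed_form (k : Int) (x y : Int) :
    (PySem.List.pyRange 0 (PySem.Int.mod k 4) 1).foldl
        (fun (p : Int × Int) _ => (p.2, -p.1)) (x, y)
      = (if PySem.Int.mod k 4 = 0 then (x, y)
         else if PySem.Int.mod k 4 = 1 then (y, -x)
         else if PySem.Int.mod k 4 = 2 then (-x, -y)
         else (-y, x)) := by
  have h0 : 0 ≤ PySem.Int.mod k 4 := PySem.Int.mod_nonneg k (by norm_num)
  have h4 : PySem.Int.mod k 4 < 4 := PySem.Int.mod_lt k (by norm_num)
  have hcases : PySem.Int.mod k 4 = 0 ∨ PySem.Int.mod k 4 = 1 ∨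
      PySem.Int.mod k 4 = 2 ∨ PySem.Int.mod k 4 = 3 := by omega
  rcases hcases with h | h | h | h <;> rw [h]
  · rw [show PySem.List.pyRange 0 0 1 = [] from by decide]; simp
  · rw [show PySem.List.pyRange 0 1 1 = [0] from by decide]; simp
  · rw [show PySem.List.pyRange 0 2 1 = [0, 1] from by decide]; simp [List.foldl]
  · rw [show PySem.List.pyRange 0 3 1 = [0, 1, 2] from by decide]; simp [List.foldl]

-- min of a negated list is minus the max
theorem foldl_min_neg (l : List Int) (x : Int) :
    (l.map Neg.neg).foldl min (-x) = -(l.foldl max x) := by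
  induction l generalizing x with
  | nil => rfl
  | cons a t ih =>
      simp only [List.map, List.foldl]
      rw [show min (-x) (-a) = -(max x a) by omega, ih]

theorem min?_map_neg (l : List Int) :
    PySem.List.min? (l.map Neg.neg) (fun x => x)
      = (PySem.List.max? l (fun x => x)).map Neg.neg := by
  cases l with
  | nil => rfl
  | cons a t =>
      simp [PySem.List.min?_id_cons, PySem.List.max?_id_cons, foldl_min_neg]

-- ===== VERDICT (by name: the statement is the Claim_ definition above) =====
theorem transform_spec : Claim_equal_transform := by
  intro cells k reflect _ hne
  obtain ⟨p, t, rfl⟩ := List.exists_cons_of_ne_nil hne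
  unfold Spec_transform transform transform_alt pyNormalize
  rw [PySem.List.foldl_append_singleton_eq_map]
  simp only [rot_closed_form]
  have h0 : 0 ≤ PySem.Int.mod k 4 := PySem.Int.mod_nonneg k (by norm_num)
  have h4 : PySem.Int.mod k 4 < 4 := PySem.Int.mod_lt k (by norm_num)
  have hcases : PySem.Int.mod k 4 = 0 ∨ PySem.Int.mod k 4 = 1 ∨
      PySem.Int.mod k 4 = 2 ∨ PySem.Int.mod k 4 = 3 := by omega
  have hfst : PySem.List.min? ((p :: t).map Prod.fst) (fun x => x)
      = some ((t.map Prod.fst).foldl min p.1) := by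
    rw [List.map_cons]; exact PySem.List.min?_id_cons p.1 (t.map Prod.fst)
  have hsnd : PySem.List.min? ((p :: t).map Prod.snd) (fun x => x)
      = some ((t.map Prod.snd).foldl min p.2) := by
    rw [List.map_cons]; exact PySem.List.min?_id_cons p.2 (t.map Prod.snd)
  have hfstmax : PySem.List.max? ((p :: t).map Prod.fst) (fun x => x)
      = some ((t.map Prod.fst).foldl max p.1) := by
    rw [List.map_cons]; exact PySem.List.max?_id_cons p.1 (t.map Prod.fst)
  have hsndmax : PySem.List.max? ((p :: t).map Prod.snd) (fun x => x)
      = some ((t.map Prod.snd).foldl max p.2) := by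
    rw [List.map_cons]; exact PySem.List.max?_id_cons p.2 (t.map Prod.snd)
  have hnegfst : PySem.List.min? ((p :: t).map (fun rc => (-rc.1 : Int))) (fun x => x)
      = some (-((t.map Prod.fst).foldl max p.1)) := by
    rw [show ((p :: t).map fun rc => (-rc.1 : Int)) = ((p :: t).map Prod.fst).map Neg.neg by
          simp [List.map_map, Function.comp_def],
        min?_map_neg, hfstmax, Option.map_some]
  have hnegsnd : PySem.List.min? ((p :: t).map (fun rc => (-rc.2 : Int))) (fun x => x)
      = some (-((t.map Prod.snd).foldl max p.2)) := by
    rw [show ((p :: t).map fun rc => (-rc.2 : Int)) = ((p :: t).map Prod.snd).map Neg.neg by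
          simp [List.map_map, Function.comp_def],
        min?_map_neg, hsndmax, Option.map_some]
  rcases hcases with h | h | h | h <;> rw [h] <;> cases reflect
  all_goals
    simp only [Int.reduceEq, ite_true, ite_false, Bool.false_eq_true, neg_neg,
      List.nil_append, List.map_map, Function.comp_def, hfst, hsnd, hfstmax, hsndmax,
      hnegfst, hnegsnd]
    rw [PySem.List.foldl_append_singleton_eq_map]
    congr 1
  all_goals
    simp only [List.nil_append]
    refine List.map_congr_left (fun rc _ => ?_)
    simp only [Prod.mk.injEq]
    constructor <;> first | trivial | ring
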